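-- pv_equiv track=rewrite | github.com/Hind76/A1-Sorting-algorithms-performance-divide-and-concur | Part 1 .py | distribute_chocolates_recursive
-- ===== SOURCE A (Python) =====
-- def distribute_chocolates_recursive(chocolates, students, distribution=None):
--     # Base case: If no more chocolates or students are left, return the distribution
--     if distribution is None:
--         distribution = {}
--     if len(students) == 0 or len(chocolates) == 0:
--         return distribution
--
--     # Recursive step: Distribute chocolates to students
--     chocolate = chocolates.pop(0)  # Take the first chocolate
--     student = students.pop(0)  # Take the first student
--     distribution[student] = chocolate  # Assign the chocolate to the student
--
--     # Recursive call with updated lists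
--     return distribute_chocolates_recursive(chocolates, students, distribution)
-- ===== SOURCE B (Python) =====
-- def distribute_chocolates_recursive(chocolates, students, distribution=None):
--     if distribution is None:
--         distribution = {}
--     n = min(len(chocolates), len(students))
--     distribution.update(zip(students, chocolates))
--     del chocolates[:n]
--     del students[:n]
--     return distribution
-- ===== Notes on version B (the rewrite author's own statement) =====
-- stated objective: faster
-- what changed: Replaces the tail recursion with pop(0) per step by a single dict.update over zip(students, chocolates) plus one prefix deletion on each list (same front-consuming mutation, no recursion and no per-step list shifting).
import Mathlib
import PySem

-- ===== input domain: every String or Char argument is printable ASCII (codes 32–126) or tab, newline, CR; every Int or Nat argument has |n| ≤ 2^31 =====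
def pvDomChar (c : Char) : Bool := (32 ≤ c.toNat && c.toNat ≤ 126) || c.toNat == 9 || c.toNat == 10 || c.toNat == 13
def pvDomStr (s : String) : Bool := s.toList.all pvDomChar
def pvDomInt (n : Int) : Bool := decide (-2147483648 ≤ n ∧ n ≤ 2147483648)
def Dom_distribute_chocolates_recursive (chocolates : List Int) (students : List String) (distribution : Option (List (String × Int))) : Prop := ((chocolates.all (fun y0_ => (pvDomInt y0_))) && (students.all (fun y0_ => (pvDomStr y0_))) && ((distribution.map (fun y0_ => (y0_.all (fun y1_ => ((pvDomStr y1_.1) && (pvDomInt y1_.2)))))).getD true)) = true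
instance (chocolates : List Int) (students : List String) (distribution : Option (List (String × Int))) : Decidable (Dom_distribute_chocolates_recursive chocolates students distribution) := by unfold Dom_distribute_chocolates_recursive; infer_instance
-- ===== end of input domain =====

-- B replaces A's pop(0) tail recursion with one dict.update over zip plus prefix deletions (idiomatic).
-- A and B both mutate the argument lists in place (the same way); the theorems below are about the RETURN value.

-- ===== PORT A =====
-- A's recursion after the `distribution is None` check: stop when either list is
-- empty, else pop both fronts and assign, then recurse with the updated dict.
def pvALoop : List Int → List String → PySem.Dict String Int → PySem.Dict String Int
  | [], _, d => d
  | _, [], d => d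
  | chocolate :: ct, student :: st, d => pvALoop ct st (d.insert student chocolate)

def distribute_chocolates_recursive (chocolates : List Int) (students : List String) (distribution : Option (List (String × Int))) : List (String × Int) :=
  (pvALoop chocolates students (PySem.Dict.mk (distribution.getD []))).items

-- ===== PORT B =====
-- distribution.update(zip(students, chocolates)); list deletions are mutation only.
def distribute_chocolates_recursive_alt (chocolates : List Int) (students : List String) (distribution : Option (List (String × Int))) : List (String × Int) :=
  ((List.zip students chocolates).foldl (fun d p => d.insert p.1 p.2) (PySem.Dict.mk (distribution.getD []))).items

-- ===== PRECONDITION & SPEC =====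
def Spec_distribute_chocolates_recursive (chocolates : List Int) (students : List String) (distribution : Option (List (String × Int))) (out : List (String × Int)) : Prop := out = distribute_chocolates_recursive_alt chocolates students distribution
instance (chocolates : List Int) (students : List String) (distribution : Option (List (String × Int))) (out : List (String × Int)) : Decidable (Spec_distribute_chocolates_recursive chocolates students distribution out) := by unfold Spec_distribute_chocolates_recursive; infer_instance

-- ===== CLAIM (what is proved, stated in full; the proofs are below) =====
def Claim_equal_distribute_chocolates_recursive : Prop := ∀ (chocolates : List Int) (students : List String) (distribution : Option (List (String × Int))), Dom_distribute_chocolates_recursive chocolates students distribution → Spec_distribute_chocolates_recursive chocolates students distribution (distribute_chocolates_recursive chocolates students distribution)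

-- ===== LEMMAS AND PROOFS =====
theorem pvALoop_eq_foldl (c : List Int) (s : List String) (d : PySem.Dict String Int) :
    pvALoop c s d = (List.zip s c).foldl (fun d p => d.insert p.1 p.2) d := by
  induction s generalizing c d with
  | nil => cases c <;> simp [pvALoop]
  | cons st stt ih =>
    cases c with
    | nil => simp [pvALoop]
    | cons ch ct => simp [pvALoop, List.zip, ih]

-- ===== VERDICT (by name: the statement is the Claim_ definition above) =====
theorem distribute_chocolates_recursive_spec : Claim_equal_distribute_chocolates_recursive := by
  intro c s d _
  unfold Spec_distribute_chocolates_recursive distribute_chocolates_recursive distribute_chocolates_recursive_alt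
  rw [pvALoop_eq_foldl]
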